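-- pv_equiv track=rewrite | github.com/dmdals1012/st-secret | app.py | calc_unique_combinations
-- ===== SOURCE A (Python) =====
-- import itertools
--
-- def calc_unique_combinations(inputs):
--     """중복 없는 조합 수 계산 함수"""
--     if not all(len(col) > 0 for col in inputs):
--         return 0
--
--     all_combos = itertools.product(*inputs)
--     unique_count = 0
--
--     for combo in all_combos:
--         if len(set(combo)) == 6:
--             unique_count += 1
--
--     return unique_count
-- ===== SOURCE B (Python) =====
-- def calc_unique_combinations(inputs):
--     """중복 없는 조합 수 계산 함수"""
--     def count_from(i, used):
--         if len(used) > 6: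
--             return 0
--         if i == len(inputs):
--             return 1 if len(used) == 6 else 0
--         total = 0
--         for v in inputs[i]:
--             total += count_from(i + 1, used | {v})
--         return total
--     return count_from(0, frozenset())
-- ===== Notes on version B (the rewrite author's own statement) =====
-- stated objective: faster
-- what changed: Replaced full itertools.product enumeration with per-tuple set construction by a recursive backtracking count that carries the running set of distinct values and prunes any branch once more than 6 distinct values appear (extensions can only grow the set), never materializing the tuples.
import Mathlib
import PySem

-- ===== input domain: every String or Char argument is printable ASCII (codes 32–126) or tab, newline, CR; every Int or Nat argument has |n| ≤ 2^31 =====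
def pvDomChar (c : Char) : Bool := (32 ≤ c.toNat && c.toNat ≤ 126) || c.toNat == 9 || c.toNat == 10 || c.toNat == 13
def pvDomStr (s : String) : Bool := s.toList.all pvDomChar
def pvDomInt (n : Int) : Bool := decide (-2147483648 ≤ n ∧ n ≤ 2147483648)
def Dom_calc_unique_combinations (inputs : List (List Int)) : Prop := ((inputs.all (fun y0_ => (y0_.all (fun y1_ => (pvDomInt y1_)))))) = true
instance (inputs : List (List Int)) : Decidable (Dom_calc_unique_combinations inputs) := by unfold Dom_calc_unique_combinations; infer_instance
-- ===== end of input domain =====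

-- B replaces full product enumeration + per-tuple set check by recursive backtracking that
-- carries the running distinct-value set and prunes branches once more than 6 distinct values
-- appear (objective: faster on inputs with many distinct values).


-- ===== PORT A =====
-- itertools.product(*inputs): first column varies slowest
def pyProduct (cols : List (List Int)) : List (List Int) :=
  match cols with
  | [] => [[]]
  | c :: rest => c.flatMap (fun v => (pyProduct rest).map (fun t => v :: t))

def calc_unique_combinations (inputs : List (List Int)) : Int :=
  if !(inputs.all (fun col => decide (col.length > 0))) then 0
  else
    (pyProduct inputs).foldl
      (fun unique_count combo =>
        if (PySem.Set.ofList combo).length == 6 then unique_count + 1 else unique_count) 0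

-- ===== PORT B =====
-- count_from(i, used): recursion over the remaining columns, carrying the set of used values
def altGo (cols : List (List Int)) (used : PySem.Set Int) : Int :=
  if used.length > 6 then 0
  else
    match cols with
    | [] => if used.length == 6 then 1 else 0
    | c :: rest => c.foldl (fun total v => total + altGo rest (used.add v)) 0

def calc_unique_combinations_alt (inputs : List (List Int)) : Int :=
  altGo inputs PySem.Set.empty

-- ===== PRECONDITION & SPEC =====
def Spec_calc_unique_combinations (inputs : List (List Int)) (out : Int) : Prop := out = calc_unique_combinations_alt inputs
instance (inputs : List (List Int)) (out : Int) : Decidable (Spec_calc_unique_combinations inputs out) := by unfold Spec_calc_unique_combinations; infer_instance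

-- ===== CLAIM (what is proved, stated in full; the proofs are below) =====
def Claim_equal_calc_unique_combinations : Prop := ∀ (inputs : List (List Int)), Dom_calc_unique_combinations inputs → Spec_calc_unique_combinations inputs (calc_unique_combinations inputs)

-- ===== LEMMAS AND PROOFS =====

-- common spec: number of tuples in the product whose value set (unioned onto `used`) has size 6
def cnt (cols : List (List Int)) (used : PySem.Set Int) : Nat :=
  (pyProduct cols).countP (fun t => (t.foldl PySem.Set.add used).length == 6)

theorem set_add_length_ge (s : PySem.Set Int) (v : Int) : s.length ≤ (s.add v).length := by
  simp only [PySem.Set.add]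
  split
  · exact le_refl _
  · simp

theorem foldl_add_length_ge (t : List Int) (s : PySem.Set Int) :
    s.length ≤ (t.foldl PySem.Set.add s).length := by
  induction t generalizing s with
  | nil => simp [List.foldl]
  | cons v rest ih => exact le_trans (set_add_length_ge s v) (ih (s.add v))

theorem cnt_zero_of_big (cols : List (List Int)) (used : PySem.Set Int)
    (h : 6 < used.length) : cnt cols used = 0 := by
  unfold cnt
  rw [List.countP_eq_zero]
  intro t _
  have := foldl_add_length_ge t used
  simp only [beq_iff_eq]
  omega

theorem foldl_count_eq (p : List Int → Bool) (l : List (List Int)) (acc : Int) :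
    l.foldl (fun a t => if p t then a + 1 else a) acc = acc + (l.countP p : Int) := by
  induction l generalizing acc with
  | nil => simp
  | cons t rest ih =>
    simp only [List.foldl_cons, List.countP_cons, ih]
    by_cases h : p t = true
    · simp [h]; ring
    · simp [h]

theorem foldl_sum_eq (f : Int → Int) (c : List Int) (acc : Int) :
    c.foldl (fun total v => total + f v) acc = acc + (c.map f).sum := by
  induction c generalizing acc with
  | nil => simp
  | cons v rest ih =>
    simp only [List.foldl_cons, List.map_cons, List.sum_cons, ih]
    ring

theorem cnt_cons (c : List Int) (rest : List (List Int)) (used : PySem.Set Int) :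
    cnt (c :: rest) used = (c.map (fun v => cnt rest (used.add v))).sum := by
  unfold cnt
  show List.countP _ ((pyProduct (c :: rest))) = _
  simp only [pyProduct, List.countP_flatMap]
  refine congrArg List.sum (List.map_congr_left ?_)
  intro v _
  simp only [Function.comp_apply, List.countP_map]
  refine List.countP_congr ?_
  intro t _
  simp [List.foldl_cons]

theorem cast_sum_map (c : List Int) (f : Int → Nat) :
    (((c.map f).sum : Nat) : Int) = (c.map (fun v => (f v : Int))).sum := by
  induction c with
  | nil => simp
  | cons v rest ih => simp [ih]

theorem altGo_eq_cnt (cols : List (List Int)) (used : PySem.Set Int) :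
    altGo cols used = (cnt cols used : Int) := by
  induction cols generalizing used with
  | nil =>
    unfold altGo cnt
    simp only [pyProduct, List.countP_cons, List.countP_nil, List.foldl_nil]
    by_cases h : used.length = 6
    · simp [h]
    · by_cases hb : used.length > 6 <;> simp [h, hb]
  | cons c rest ih =>
    unfold altGo
    by_cases hb : used.length > 6
    · rw [if_pos hb, cnt_zero_of_big _ _ hb]; simp
    · rw [if_neg hb]
      show List.foldl (fun total v => total + altGo rest (used.add v)) 0 c = _
      rw [cnt_cons, foldl_sum_eq, cast_sum_map]
      simp only [ih]
      ring

theorem product_nil_of_empty (inputs : List (List Int)) (h : ∃ c ∈ inputs, c = []) :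
    pyProduct inputs = [] := by
  induction inputs with
  | nil => simp at h
  | cons c rest ih =>
    rcases h with ⟨d, hd, hde⟩
    rcases List.mem_cons.mp hd with h1 | h1
    · subst h1; subst hde; simp [pyProduct]
    · simp only [pyProduct]
      rw [ih ⟨d, h1, hde⟩]
      simp

-- ===== VERDICT (by name: the statement is the Claim_ definition above) =====
theorem calc_unique_combinations_spec : Claim_equal_calc_unique_combinations := by
  intro inputs _
  unfold Spec_calc_unique_combinations calc_unique_combinations_alt calc_unique_combinations
  rw [altGo_eq_cnt]
  by_cases hall : inputs.all (fun col => decide (col.length > 0)) = true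
  · rw [hall]
    simp only [Bool.not_true, Bool.false_eq_true, if_false]
    rw [foldl_count_eq]
    unfold cnt
    norm_num
    refine List.countP_congr ?_
    intro t _
    rw [PySem.Set.ofList_eq_foldl]
  · have hne : inputs.all (fun col => decide (col.length > 0)) = false :=
      Bool.eq_false_iff.mpr hall
    rw [hne]
    simp only [Bool.not_false, if_true]
    have hx : ∃ c ∈ inputs, c = [] := by
      rcases List.all_eq_false.mp hne with ⟨c, hc, hcf⟩
      exact ⟨c, hc, by simpa using hcf⟩
    rw [show cnt inputs PySem.Set.empty = 0 by unfold cnt; rw [product_nil_of_empty _ hx]; rfl]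
    rfl
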